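-- pv_equiv track=rewrite | github.com/sgfn/miscellaneous | uni/s3_agra/project1/example.py | my_solve
-- ===== SOURCE A (Python) =====
-- from heapq import heapify as k, heappop as l, heappush as m
--
-- def my_solve(N, M, K, base, wages, eq_cost): # O((K+N) log N + NM log M) maybe idk
--     a = [sorted((h+eq_cost[g-1] for g, h in i)) for i in wages] # O(NM log M)
--     b = [0 for _ in range(N)] # O(N)
--     c = [(a[j][0] + base[j][0], j) for j in range(N)] # O(N)
--     d = 0
--     k(c) # O(N log N)
--     for _ in range(K): # O(K log N)
--         e, f = l(c) # O(log N)
--         b[f] += 1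
--         d += e
--         if b[f] < len(a[f]) and b[f] < len(base[f]): m(c, (a[f][b[f]] + base[f][b[f]]-base[f][b[f]-1], f)) # O(log N)
--     return d
-- ===== SOURCE B (Python) =====
-- def my_solve(N, M, K, base, wages, eq_cost):
--     a = [sorted(h + eq_cost[g - 1] for g, h in row) for row in wages]
--     pos = [0] * N
--     def marginal(j):
--         p = pos[j]
--         return a[j][p] + base[j][p] - (base[j][p - 1] if p > 0 else 0)
--     total = 0
--     for _ in range(K):
--         best = min((j for j in range(N) if pos[j] < len(a[j]) and pos[j] < len(base[j])),
--                    key=marginal)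
--         total += marginal(best)
--         pos[best] += 1
--     return total
-- ===== Notes on version B (the rewrite author's own statement) =====
-- stated objective: simpler
-- what changed: Replaces A's heapq priority queue (heapify + heappop/heappush of running marginal-cost tuples) by a per-worker position array: each round a linear scan picks the first worker with the minimal current marginal, recomputed from the position, so no heap and no carried tuples are needed.
import Mathlib
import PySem

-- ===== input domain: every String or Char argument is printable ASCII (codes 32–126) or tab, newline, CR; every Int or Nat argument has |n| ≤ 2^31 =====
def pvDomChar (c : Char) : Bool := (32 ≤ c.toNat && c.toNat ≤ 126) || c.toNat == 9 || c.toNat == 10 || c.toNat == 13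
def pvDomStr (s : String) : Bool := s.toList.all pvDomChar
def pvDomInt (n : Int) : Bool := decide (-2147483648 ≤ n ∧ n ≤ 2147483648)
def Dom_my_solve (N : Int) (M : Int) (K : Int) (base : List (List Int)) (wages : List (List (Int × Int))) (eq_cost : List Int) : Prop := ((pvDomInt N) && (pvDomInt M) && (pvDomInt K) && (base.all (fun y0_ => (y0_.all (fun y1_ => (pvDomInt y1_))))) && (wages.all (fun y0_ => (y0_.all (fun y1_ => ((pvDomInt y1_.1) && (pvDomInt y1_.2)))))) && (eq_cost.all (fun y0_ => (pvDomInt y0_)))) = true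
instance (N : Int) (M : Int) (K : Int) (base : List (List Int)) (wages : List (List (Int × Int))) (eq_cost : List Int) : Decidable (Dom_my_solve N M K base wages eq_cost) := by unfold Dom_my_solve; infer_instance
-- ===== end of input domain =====

-- B replaces A's heap by a per-worker position array with a linear argmin scan each round
-- (objective: simpler — no priority queue, the current marginal is recomputed from the position).
-- Both Pythons share the first line (the sorted per-worker combined-cost lists); the helper
-- combineRow below is that shared line.

-- ===== PORT A =====
-- sorted(h + eq_cost[g-1] for g, h in row): eq_cost[g-1] may be a negative Python index → pyGetD
def combineRow (eq_cost : List Int) (row : List (Int × Int)) : List Int :=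
  PySem.List.sorted (row.map (fun gh => gh.2 + PySem.List.pyGetD eq_cost (gh.1 - 1) 0)) (fun x => x) false

-- heapq model: the heap list is kept sorted by Python's lexicographic tuple order; heappush is
-- ordered insertion, heappop takes the head, heapify sorts.  This is observably EXACT here:
-- heapq pops the tuple-minimal element, and all entries pushed have pairwise-distinct second
-- components (worker indices), so the sequence of popped elements is fully determined.
def hpush : List (Int × Int) → (Int × Int) → List (Int × Int)
  | [], x => [x]
  | y :: ys, x =>
    if x.1 < y.1 ∨ (x.1 = y.1 ∧ x.2 ≤ y.2) then x :: y :: ys else y :: hpush ys x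

def hinit (l : List (Int × Int)) : List (Int × Int) := l.foldr (fun x acc => hpush acc x) []

-- the 'for _ in range(K)' loop of A; an empty heap means Python's heappop raises IndexError
-- (excluded by Pre_), the port just stops there
def loopA (a base : List (List Int)) : Nat → List (Int × Int) → List Int → Int → Int
  | 0, _, _, d => d
  | _ + 1, [], _, d => d
  | t + 1, (e, f) :: rest, b, d =>
      let fn := f.toNat
      let bf := b.getD fn 0 + 1
      let b' := b.set fn bf
      let af := a.getD fn []
      let bsf := base.getD fn []
      let heap' := if bf < (af.length : Int) ∧ bf < (bsf.length : Int)
        then hpush rest (af.getD bf.toNat 0 + bsf.getD bf.toNat 0 - bsf.getD (bf.toNat - 1) 0, f)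
        else rest
      loopA a base t heap' b' (d + e)

def my_solve (N : Int) (M : Int) (K : Int) (base : List (List Int)) (wages : List (List (Int × Int))) (eq_cost : List Int) : Int :=
  let a := wages.map (combineRow eq_cost)
  let n := N.toNat
  let b := List.replicate n (0 : Int)
  let c := (List.range n).map (fun j => ((a.getD j []).getD 0 0 + (base.getD j []).getD 0 0, (j : Int)))
  loopA a base K.toNat (hinit c) b 0

-- ===== PORT B =====
-- marginal(j): current front marginal cost of worker j at position pos[j]
def marg (a base : List (List Int)) (pos : List Int) (j : Nat) : Int :=
  let p := (pos.getD j 0).toNat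
  (a.getD j []).getD p 0 + (base.getD j []).getD p 0 -
    (if 0 < p then (base.getD j []).getD (p - 1) 0 else 0)

-- pos[j] < len(a[j]) and pos[j] < len(base[j])
def liveB (a base : List (List Int)) (pos : List Int) (j : Nat) : Bool :=
  decide (pos.getD j 0 < ((a.getD j []).length : Int)) &&
  decide (pos.getD j 0 < ((base.getD j []).length : Int))

-- min((j for j in range(N) if …), key=marginal): first index attaining the minimal key
def pick (a base : List (List Int)) (n : Nat) (pos : List Int) : Option Nat :=
  (List.range n).foldl (fun acc j =>
    if liveB a base pos j then
      match acc with
      | none => some j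
      | some bj => if marg a base pos j < marg a base pos bj then some j else some bj
    else acc) none

-- the 'for _ in range(K)' loop of B; pick = none means Python's min raises ValueError
-- (excluded by Pre_), the port just stops there
def loopB (a base : List (List Int)) (n : Nat) : Nat → List Int → Int → Int
  | 0, _, tot => tot
  | t + 1, pos, tot =>
    match pick a base n pos with
    | none => tot
    | some j => loopB a base n t (pos.set j (pos.getD j 0 + 1)) (tot + marg a base pos j)

def my_solve_alt (N : Int) (M : Int) (K : Int) (base : List (List Int)) (wages : List (List (Int × Int))) (eq_cost : List Int) : Int :=
  let a := wages.map (combineRow eq_cost)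
  loopB a base N.toNat K.toNat (List.replicate N.toNat 0) 0

-- ===== PRECONDITION & SPEC =====
-- Pre_ = exactly the inputs where A returns: the first N rows of wages and base exist and are
-- nonempty, every g indexes eq_cost (Python negative indices allowed), and K does not exceed the
-- total number of available marginals (otherwise heappop hits an empty heap → IndexError).
def Pre_my_solve (N : Int) (M : Int) (K : Int) (base : List (List Int)) (wages : List (List (Int × Int))) (eq_cost : List Int) : Prop :=
  N.toNat ≤ wages.length ∧ N.toNat ≤ base.length ∧
  (∀ row ∈ wages, ∀ gh ∈ row, 1 - (eq_cost.length : Int) ≤ gh.1 ∧ gh.1 ≤ (eq_cost.length : Int)) ∧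
  (∀ j < N.toNat, wages.getD j [] ≠ [] ∧ base.getD j [] ≠ []) ∧
  K ≤ ((List.range N.toNat).map
        (fun j => ((min (wages.getD j []).length (base.getD j []).length : Nat) : Int))).sum
instance (N : Int) (M : Int) (K : Int) (base : List (List Int)) (wages : List (List (Int × Int))) (eq_cost : List Int) : Decidable (Pre_my_solve N M K base wages eq_cost) := by unfold Pre_my_solve; infer_instance

def pvWitness_my_solve : Int × Int × Int × List (List Int) × (List (List (Int × Int))) × List Int :=
  (2, 1, 3, [[1, 2], [3]], [[(1, 5), (2, 1)], [(1, 2)]], [10, 20])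

def Spec_my_solve (N : Int) (M : Int) (K : Int) (base : List (List Int)) (wages : List (List (Int × Int))) (eq_cost : List Int) (out : Int) : Prop := out = my_solve_alt N M K base wages eq_cost
instance (N : Int) (M : Int) (K : Int) (base : List (List Int)) (wages : List (List (Int × Int))) (eq_cost : List Int) (out : Int) : Decidable (Spec_my_solve N M K base wages eq_cost out) := by unfold Spec_my_solve; infer_instance

-- ===== CLAIM (what is proved, stated in full; the proofs are below) =====
def Claim_equal_my_solve : Prop := ∀ (N : Int) (M : Int) (K : Int) (base : List (List Int)) (wages : List (List (Int × Int))) (eq_cost : List Int), Dom_my_solve N M K base wages eq_cost → Pre_my_solve N M K base wages eq_cost → Spec_my_solve N M K base wages eq_cost (my_solve N M K base wages eq_cost)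

-- ===== LEMMAS AND PROOFS =====

-- Python's lexicographic ≤ on int pairs (the order heapq uses on the pushed tuples)
def pairLe (x y : Int × Int) : Prop := x.1 < y.1 ∨ (x.1 = y.1 ∧ x.2 ≤ y.2)

theorem pairLe_refl (x : Int × Int) : pairLe x x := by simp [pairLe]

theorem pairLe_total (x y : Int × Int) : pairLe x y ∨ pairLe y x := by
  unfold pairLe; omega

theorem pairLe_antisymm {x y : Int × Int} (h1 : pairLe x y) (h2 : pairLe y x) : x = y := by
  obtain ⟨a, b⟩ := x; obtain ⟨c, d⟩ := y
  unfold pairLe at h1 h2; simp_all; omega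

theorem hpush_perm (l : List (Int × Int)) (x : Int × Int) : (hpush l x).Perm (x :: l) := by
  induction l with
  | nil => simp [hpush]
  | cons y ys ih =>
    unfold hpush
    split
    · exact List.Perm.refl _
    · exact (ih.cons y).trans (List.Perm.swap x y ys)

theorem pairLe_trans {x y z : Int × Int} (h1 : pairLe x y) (h2 : pairLe y z) : pairLe x z := by
  unfold pairLe at *; omega

theorem hpush_pairwise {l : List (Int × Int)} (x : Int × Int)
    (h : l.Pairwise pairLe) : (hpush l x).Pairwise pairLe := by
  induction l with
  | nil => simp [hpush]
  | cons y ys ih =>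
    rw [List.pairwise_cons] at h
    unfold hpush
    split
    · rename_i hle
      have hxy : pairLe x y := hle
      refine List.pairwise_cons.2 ⟨?_, List.pairwise_cons.2 h⟩
      intro z hz
      rcases List.mem_cons.1 hz with rfl | hz
      · exact hxy
      · exact pairLe_trans hxy (h.1 z hz)
    · rename_i hnle
      have hyx : pairLe y x := (pairLe_total x y).resolve_left (by exact hnle)
      refine List.pairwise_cons.2 ⟨?_, ih h.2⟩
      intro z hz
      rcases List.mem_cons.1 ((hpush_perm ys x).mem_iff.1 hz) with rfl | hz
      · exact hyx
      · exact h.1 z hz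

theorem hinit_perm (l : List (Int × Int)) : (hinit l).Perm l := by
  induction l with
  | nil => simp [hinit]
  | cons x xs ih =>
    simp only [hinit, List.foldr_cons]
    exact (hpush_perm _ x).trans (ih.cons x)

theorem hinit_pairwise (l : List (Int × Int)) : (hinit l).Pairwise pairLe := by
  induction l with
  | nil => simp [hinit]
  | cons x xs ih => exact hpush_pairwise x ih

-- a sorted list permuting L IS hinit L
theorem canon_unique {l L : List (Int × Int)} (h1 : l.Pairwise pairLe) (h2 : l.Perm L) :
    l = hinit L := by
  refine List.Perm.eq_of_pairwise (fun a b _ _ hab hba => pairLe_antisymm hab hba)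
    h1 (hinit_pairwise L) (h2.trans (hinit_perm L).symm)

theorem hinit_head_min {L : List (Int × Int)} {x : Int × Int} {r : List (Int × Int)}
    (h : hinit L = x :: r) : ∀ y ∈ L, pairLe x y := by
  intro y hy
  have hy' : y ∈ x :: r := h ▸ ((hinit_perm L).symm.mem_iff.1 hy)
  rcases List.mem_cons.1 hy' with rfl | hy'
  · exact pairLe_refl y
  · have := hinit_pairwise L
    rw [h, List.pairwise_cons] at this
    exact this.1 y hy'

-- the candidate list B scans, in index order, with the values A's heap holds
def liveList (a base : List (List Int)) (n : Nat) (pos : List Int) : List (Int × Int) :=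
  (List.range n).filterMap (fun j =>
    if liveB a base pos j then some (marg a base pos j, (j : Int)) else none)

def capf (a base : List (List Int)) (j : Nat) : Nat :=
  min (a.getD j []).length (base.getD j []).length

def slack (a base : List (List Int)) (n : Nat) (pos : List Int) : Nat :=
  ((List.range n).map (fun j => capf a base j - (pos.getD j 0).toNat)).sum

theorem getD_set_ne (l : List Int) (j k : Nat) (v : Int) (h : j ≠ k) :
    (l.set j v).getD k 0 = l.getD k 0 := by
  simp [List.getD_eq_getElem?_getD, List.getElem?_set_ne h]

theorem getD_set_self (l : List Int) (j : Nat) (v : Int) (h : j < l.length) :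
    (l.set j v).getD j 0 = v := by
  simp [List.getD_eq_getElem?_getD, h]

theorem liveB_iff (a base : List (List Int)) (pos : List Int) (j : Nat)
    (h0 : 0 ≤ pos.getD j 0) :
    liveB a base pos j = true ↔ (pos.getD j 0).toNat < capf a base j := by
  simp only [liveB, capf, Bool.and_eq_true, decide_eq_true_eq]
  omega

theorem marg_set_ne (a base : List (List Int)) (pos : List Int) (j k : Nat) (v : Int)
    (h : j ≠ k) : marg a base (pos.set j v) k = marg a base pos k := by
  unfold marg; rw [getD_set_ne _ _ _ _ h]

theorem liveB_set_ne (a base : List (List Int)) (pos : List Int) (j k : Nat) (v : Int)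
    (h : j ≠ k) : liveB a base (pos.set j v) k = liveB a base pos k := by
  unfold liveB; rw [getD_set_ne _ _ _ _ h]

theorem mem_liveList {a base : List (List Int)} {n : Nat} {pos : List Int} {x : Int × Int} :
    x ∈ liveList a base n pos ↔
      ∃ j, j < n ∧ liveB a base pos j = true ∧ x = (marg a base pos j, (j : Int)) := by
  unfold liveList
  rw [List.mem_filterMap]
  constructor
  · rintro ⟨j, hj, hfx⟩
    rw [List.mem_range] at hj
    by_cases hl : liveB a base pos j = true
    · rw [if_pos hl] at hfx; exact ⟨j, hj, hl, (Option.some.inj hfx).symm⟩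
    · rw [if_neg hl] at hfx; cases hfx
  · rintro ⟨j, hj, hl, rfl⟩
    exact ⟨j, List.mem_range.2 hj, by rw [if_pos hl]⟩

theorem pick_spec (a base : List (List Int)) (n : Nat) (pos : List Int) :
    (pick a base n pos = none ∧ ∀ k, k < n → liveB a base pos k = false) ∨
    (∃ j, pick a base n pos = some j ∧ j < n ∧ liveB a base pos j = true ∧
      ∀ k, k < n → liveB a base pos k = true →
        pairLe (marg a base pos j, (j : Int)) (marg a base pos k, (k : Int))) := by
  unfold pick
  induction n with
  | zero => left; simp
  | succ m ih =>
    rw [List.range_succ, List.foldl_append, List.foldl_cons, List.foldl_nil]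
    rcases ih with ⟨hnone, hdead⟩ | ⟨j, hj, hjm, hlj, hmin⟩
    · rw [hnone]
      by_cases hl : liveB a base pos m = true
      · right
        refine ⟨m, by simp [hl], Nat.lt_succ_self m, hl, ?_⟩
        intro k hk hlk
        rcases Nat.lt_succ_iff_lt_or_eq.1 hk with hk | rfl
        · exact absurd hlk (by simp [hdead k hk])
        · exact pairLe_refl _
      · left
        refine ⟨by simp [hl], ?_⟩
        intro k hk
        rcases Nat.lt_succ_iff_lt_or_eq.1 hk with hk | rfl
        · exact hdead k hk
        · simpa using hl
    · rw [hj]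
      by_cases hl : liveB a base pos m = true
      · right
        by_cases hlt : marg a base pos m < marg a base pos j
        · refine ⟨m, by simp [hl, hlt], Nat.lt_succ_self m, hl, ?_⟩
          intro k hk hlk
          rcases Nat.lt_succ_iff_lt_or_eq.1 hk with hk | rfl
          · have := hmin k hk hlk
            unfold pairLe at *; simp only at *; omega
          · exact pairLe_refl _
        · refine ⟨j, by simp [hl, hlt], Nat.lt_succ_of_lt hjm, hlj, ?_⟩
          intro k hk hlk
          rcases Nat.lt_succ_iff_lt_or_eq.1 hk with hk | rfl
          · exact hmin k hk hlk
          · unfold pairLe; simp only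
            have : (j : Int) ≤ (k : Int) := by exact_mod_cast Nat.le_of_lt hjm
            omega
      · right
        refine ⟨j, by simp [hl], Nat.lt_succ_of_lt hjm, hlj, ?_⟩
        intro k hk hlk
        rcases Nat.lt_succ_iff_lt_or_eq.1 hk with hk | rfl
        · exact hmin k hk hlk
        · exact absurd hlk (by simp [hl])

theorem liveList_split (a base : List (List Int)) (n : Nat) (pos : List Int) {j : Nat}
    (hj : j < n) :
    liveList a base n pos =
      (liveList a base j pos ++
        (if liveB a base pos j then [(marg a base pos j, (j : Int))] else [])) ++
      (List.range (n - j - 1)).filterMap (fun i =>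
        if liveB a base pos (j + 1 + i) then
          some (marg a base pos (j + 1 + i), ((j + 1 + i : Nat) : Int)) else none) := by
  unfold liveList
  conv_lhs => rw [show n = (j + 1) + (n - j - 1) by omega]
  rw [List.range_add, List.filterMap_append, List.range_succ, List.filterMap_append,
      List.filterMap_map]
  congr 1
  congr 1
  by_cases hl : liveB a base pos j = true <;> simp [hl]

theorem slack_set (a base : List (List Int)) (n : Nat) (pos : List Int) {j : Nat}
    (hj : j < n) (hlen : pos.length = n) (hp : 0 ≤ pos.getD j 0)
    (hl : liveB a base pos j = true) :
    slack a base n pos = slack a base n (pos.set j (pos.getD j 0 + 1)) + 1 := by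
  have hlt : (pos.getD j 0).toNat < capf a base j := (liveB_iff a base pos j hp).1 hl
  unfold slack
  rw [show n = (j + 1) + (n - j - 1) by omega]
  rw [List.range_add, List.range_succ]
  simp only [List.map_append, List.sum_append, List.map_map]
  have h1 : (List.range j).map
      (fun k => capf a base k - (((pos.set j (pos.getD j 0 + 1)).getD k 0)).toNat) =
      (List.range j).map (fun k => capf a base k - ((pos.getD k 0)).toNat) := by
    apply List.map_congr_left
    intro k hk
    rw [List.mem_range] at hk
    rw [getD_set_ne _ _ _ _ (by omega)]
  have h2 : (List.range (n - j - 1)).map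
      ((fun k => capf a base k - (((pos.set j (pos.getD j 0 + 1)).getD k 0)).toNat) ∘
        (fun x => j + 1 + x)) =
      (List.range (n - j - 1)).map
      ((fun k => capf a base k - ((pos.getD k 0)).toNat) ∘ (fun x => j + 1 + x)) := by
    apply List.map_congr_left
    intro k _
    simp only [Function.comp_apply]
    rw [getD_set_ne _ _ _ _ (by omega)]
  rw [h1, h2]
  have h3 : (pos.set j (pos.getD j 0 + 1)).getD j 0 = pos.getD j 0 + 1 :=
    getD_set_self _ _ _ (by omega)
  simp only [List.map_cons, List.map_nil, List.sum_cons, List.sum_nil, h3]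
  omega

theorem exists_live_of_slack (a base : List (List Int)) (n : Nat) (pos : List Int)
    (hnn : ∀ k, k < n → 0 ≤ pos.getD k 0) (hs : 0 < slack a base n pos) :
    ∃ j, j < n ∧ liveB a base pos j = true := by
  by_contra h
  simp only [not_exists, not_and] at h
  have hz : slack a base n pos = 0 := by
    unfold slack
    apply List.sum_eq_zero
    intro x hx
    rw [List.mem_map] at hx
    obtain ⟨k, hk, rfl⟩ := hx
    rw [List.mem_range] at hk
    have hlk : ¬ ((pos.getD k 0).toNat < capf a base k) := by
      intro hc
      exact (h k hk) ((liveB_iff a base pos k (hnn k hk)).2 hc)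
    omega
  omega

theorem loop_eq (a base : List (List Int)) (n : Nat) :
    ∀ (t : Nat) (pos : List Int) (d : Int),
      pos.length = n → (∀ k, k < n → 0 ≤ pos.getD k 0) → t ≤ slack a base n pos →
      loopA a base t (hinit (liveList a base n pos)) pos d = loopB a base n t pos d := by
  intro t
  induction t with
  | zero => intro pos d _ _ _; rfl
  | succ t ih =>
    intro pos d hlen hnn hsl
    obtain ⟨j0, hj0, hl0⟩ := exists_live_of_slack a base n pos hnn (by omega)
    rcases pick_spec a base n pos with ⟨_, hdead⟩ | ⟨j, hpj, hjn, hlj, hmin⟩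
    · exact absurd hl0 (by simp [hdead j0 hj0])
    have hmem : (marg a base pos j, (j : Int)) ∈ liveList a base n pos :=
      mem_liveList.2 ⟨j, hjn, hlj, rfl⟩
    have hLne : liveList a base n pos ≠ [] := fun h => by simp [h] at hmem
    obtain ⟨x, r, hxr⟩ : ∃ x r, hinit (liveList a base n pos) = x :: r := by
      cases hh : hinit (liveList a base n pos) with
      | nil =>
        have hp := hinit_perm (liveList a base n pos)
        rw [hh] at hp
        exact absurd hp.symm.eq_nil hLne
      | cons y ys => exact ⟨y, ys, rfl⟩
    have hxmem : x ∈ liveList a base n pos :=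
      (hinit_perm _).subset (by rw [hxr]; exact List.mem_cons_self)
    have hx : x = (marg a base pos j, (j : Int)) := by
      obtain ⟨k, hk, hlk, hxe⟩ := mem_liveList.1 hxmem
      exact pairLe_antisymm (hinit_head_min hxr _ hmem) (hxe ▸ hmin k hk hlk)
    -- abbreviations
    have hp0 : 0 ≤ pos.getD j 0 := hnn j hjn
    set p : Int := pos.getD j 0 with hpdef
    set pos' : List Int := pos.set j (p + 1) with hpos'
    have hgd : pos'.getD j 0 = p + 1 := getD_set_self _ _ _ (by omega)
    -- the two halves around index j, in pos and pos'
    have hsplit := liveList_split a base n pos hjn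
    rw [if_pos hlj] at hsplit
    have hsplit' := liveList_split a base n pos' hjn
    set Lpre := liveList a base j pos with hLpre
    set Lsuf := (List.range (n - j - 1)).filterMap (fun i =>
        if liveB a base pos (j + 1 + i) then
          some (marg a base pos (j + 1 + i), ((j + 1 + i : Nat) : Int)) else none) with hLsuf
    have hpre' : liveList a base j pos' = Lpre := by
      unfold liveList
      apply List.filterMap_congr
      intro k hk
      rw [List.mem_range] at hk
      rw [hpos', liveB_set_ne a base pos j k (p + 1) (by omega),
          marg_set_ne a base pos j k (p + 1) (by omega)]
    have hsuf' : (List.range (n - j - 1)).filterMap (fun i =>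
        if liveB a base pos' (j + 1 + i) then
          some (marg a base pos' (j + 1 + i), ((j + 1 + i : Nat) : Int)) else none) = Lsuf := by
      rw [hLsuf]
      apply List.filterMap_congr
      intro k _
      rw [hpos', liveB_set_ne a base pos j (j + 1 + k) (p + 1) (by omega),
          marg_set_ne a base pos j (j + 1 + k) (p + 1) (by omega)]
    rw [hpre', hsuf'] at hsplit'
    -- r is a permutation of Lpre ++ Lsuf, and pairwise-sorted
    have hrperm : r.Perm (Lpre ++ Lsuf) := by
      have h0 : (x :: r).Perm (liveList a base n pos) := by
        rw [← hxr]; exact hinit_perm _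
      rw [hsplit, hx, List.append_assoc, List.singleton_append] at h0
      exact (h0.trans List.perm_middle).cons_inv
    have hrpw : r.Pairwise pairLe := by
      have := hinit_pairwise (liveList a base n pos)
      rw [hxr, List.pairwise_cons] at this
      exact this.2
    -- the marginal of worker j after the step, as A computes it
    have htn : (p + 1).toNat = p.toNat + 1 := by omega
    have hval : (a.getD j []).getD (p + 1).toNat 0 + (base.getD j []).getD (p + 1).toNat 0 -
        (base.getD j []).getD ((p + 1).toNat - 1) 0 = marg a base pos' j := by
      unfold marg
      rw [hgd, htn]
      simp only [Nat.add_sub_cancel]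
      rw [if_pos (Nat.succ_pos p.toNat)]
    -- the new heap equals the canonical heap of the advanced position
    have hheap : ∀ hv : liveB a base pos' j = true,
        hpush r (marg a base pos' j, (j : Int)) = hinit (liveList a base n pos') := by
      intro hv
      apply canon_unique (hpush_pairwise _ hrpw)
      rw [hsplit', if_pos hv, List.append_assoc, List.singleton_append]
      exact (hpush_perm _ _).trans ((hrperm.cons _).trans List.perm_middle.symm)
    have hheap' : liveB a base pos' j = false →
        r = hinit (liveList a base n pos') := by
      intro hv
      apply canon_unique hrpw
      rw [hsplit', if_neg (by simp [hv]), List.append_nil]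
      exact hrperm
    -- induction hypothesis applies to pos'
    have hlen' : pos'.length = n := by rw [hpos', List.length_set, hlen]
    have hnn' : ∀ k, k < n → 0 ≤ pos'.getD k 0 := by
      intro k hk
      by_cases hkj : k = j
      · subst hkj; rw [hgd]; omega
      · rw [hpos', getD_set_ne _ _ _ _ (by omega)]; exact hnn k hk
    have hsl' : t ≤ slack a base n pos' := by
      have := slack_set a base n pos hjn hlen hp0 hlj
      rw [← hpdef, ← hpos'] at this
      omega
    have hih := ih pos' (d + marg a base pos j) hlen' hnn' hsl'
    -- unfold one step of each loop
    rw [hxr, hx]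
    show loopA a base (t + 1) ((marg a base pos j, (j : Int)) :: r) pos d = _
    rw [loopA]
    simp only [Int.toNat_natCast]
    rw [← hpdef, ← hpos']
    conv_rhs => rw [loopB]
    rw [hpj]
    by_cases hv : liveB a base pos' j = true
    · have hc : p + 1 < ((a.getD j []).length : Int) ∧ p + 1 < ((base.getD j []).length : Int) := by
        have := hv
        rw [hpos'] at this
        unfold liveB at this
        rw [← hpos'] at this
        rw [hgd] at this
        simp only [Bool.and_eq_true, decide_eq_true_eq] at this
        exact this
      rw [if_pos hc, hval, hheap hv]
      exact hih
    · have hc : ¬ (p + 1 < ((a.getD j []).length : Int) ∧ p + 1 < ((base.getD j []).length : Int)) := by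
        intro hcc
        apply hv
        unfold liveB
        rw [hgd]
        simp only [Bool.and_eq_true, decide_eq_true_eq]
        exact hcc
      rw [if_neg hc, hheap' (by simpa using hv)]
      exact hih

-- ===== VERDICT =====
theorem my_solve_spec : Claim_equal_my_solve := by
  unfold Claim_equal_my_solve Spec_my_solve
  intro N M K base wages eq_cost _ hpre
  obtain ⟨hw, hb, _, hnem, hk⟩ := hpre
  simp only [my_solve, my_solve_alt]
  set a := wages.map (combineRow eq_cost) with ha
  set n := N.toNat with hn
  have hlenA : ∀ j, j < n → (a.getD j []).length = (wages.getD j []).length := by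
    intro j hj
    have hjw : j < wages.length := lt_of_lt_of_le hj hw
    have hsome : a[j]? = some (combineRow eq_cost (wages[j]'hjw)) := by
      rw [ha, List.getElem?_map, List.getElem?_eq_getElem hjw]; rfl
    rw [List.getD_eq_getElem?_getD, hsome, List.getD_eq_getElem?_getD,
        List.getElem?_eq_getElem hjw]
    simp [combineRow, PySem.List.length_sorted]
  have hnn0 : ∀ k, k < n → 0 ≤ (List.replicate n (0 : Int)).getD k 0 := by
    intro k hk
    rw [List.getD_replicate 0 hk]
  have hlive0 : ∀ j ∈ List.range n,
      (if liveB a base (List.replicate n (0 : Int)) j then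
        some (marg a base (List.replicate n (0 : Int)) j, (j : Int)) else none) =
      (some ∘ fun j => ((a.getD j []).getD 0 0 + (base.getD j []).getD 0 0, (j : Int))) j := by
    intro j hj
    rw [List.mem_range] at hj
    have hw0 : wages.getD j [] ≠ [] := (hnem j hj).1
    have hb0 : base.getD j [] ≠ [] := (hnem j hj).2
    have hlA : 0 < (a.getD j []).length := by
      rw [hlenA j hj]; exact List.length_pos_of_ne_nil hw0
    have hlB : 0 < (base.getD j []).length := List.length_pos_of_ne_nil hb0
    have hlive : liveB a base (List.replicate n (0 : Int)) j = true := by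
      unfold liveB
      rw [List.getD_replicate 0 hj]
      simp only [Bool.and_eq_true, decide_eq_true_eq]
      omega
    rw [if_pos hlive]
    unfold marg
    rw [List.getD_replicate 0 hj]
    simp
  have hc : liveList a base n (List.replicate n (0 : Int)) =
      (List.range n).map (fun j => ((a.getD j []).getD 0 0 + (base.getD j []).getD 0 0, (j : Int))) := by
    unfold liveList
    rw [List.filterMap_congr hlive0, List.filterMap_eq_map]
  have hslack0 : K.toNat ≤ slack a base n (List.replicate n (0 : Int)) := by
    have h1 : slack a base n (List.replicate n (0 : Int)) =
        ((List.range n).map (fun j => min (wages.getD j []).length (base.getD j []).length)).sum := by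
      unfold slack
      apply congrArg
      apply List.map_congr_left
      intro k hk
      rw [List.mem_range] at hk
      rw [List.getD_replicate 0 hk]
      unfold capf
      rw [hlenA k hk]
      rfl
    have h2 := Nat.cast_list_sum (R := Int)
      ((List.range n).map (fun j => min (wages.getD j []).length (base.getD j []).length))
    rw [List.map_map] at h2
    have h3 : K ≤ ((slack a base n (List.replicate n (0 : Int)) : Nat) : Int) := by
      rw [h1, h2]
      exact hk
    exact Int.toNat_le.2 h3
  rw [← hc]
  exact loop_eq a base n K.toNat (List.replicate n (0 : Int)) 0
    (List.length_replicate) hnn0 hslack0
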